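-- pv_equiv track=rewrite | github.com/Jaumzinho109/codewars | Simple Fun Strings Construction.py | strings_construction
-- ===== SOURCE A (Python) =====
-- def strings_construction(a, b):
--     count = 0
--     copia = list(a)[:]
--     for v in list(b):
--         if v in copia:
--             copia.remove(v)
--             if copia == []:
--                 count += 1
--                 copia = list(a)[:]
--         else:
--             continue
--     return count
-- ===== SOURCE B (Python) =====
-- import bisect
--
--
-- def strings_construction(a, b):
--     # Offline round-jumping: index the positions of each needed character in b,
--     # then find each round's end with bisect instead of consuming b char by char.
--     if not a:
--         return 0
--     chars = []
--     for c in a: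
--         if c not in chars:
--             chars.append(c)
--     need = [a.count(c) for c in chars]
--     pos = [[i for i, ch in enumerate(b) if ch == c] for c in chars]
--     count = 0
--     s = 0
--     while True:
--         p = -1
--         for ps, k in zip(pos, need):
--             j = bisect.bisect_left(ps, s) + k - 1
--             if j >= len(ps):
--                 return count
--             p = max(p, ps[j])
--         count += 1
--         s = p + 1
-- ===== Notes on version B (the rewrite author's own statement) =====
-- stated objective: faster
-- what changed: Instead of consuming b character by character against a mutable copy of a, B precomputes per-character position indexes of b and jumps round by round: each round's end is the maximum, over the distinct characters of a, of the position of the next k-th occurrence found by binary search (bisect).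
import Mathlib
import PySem

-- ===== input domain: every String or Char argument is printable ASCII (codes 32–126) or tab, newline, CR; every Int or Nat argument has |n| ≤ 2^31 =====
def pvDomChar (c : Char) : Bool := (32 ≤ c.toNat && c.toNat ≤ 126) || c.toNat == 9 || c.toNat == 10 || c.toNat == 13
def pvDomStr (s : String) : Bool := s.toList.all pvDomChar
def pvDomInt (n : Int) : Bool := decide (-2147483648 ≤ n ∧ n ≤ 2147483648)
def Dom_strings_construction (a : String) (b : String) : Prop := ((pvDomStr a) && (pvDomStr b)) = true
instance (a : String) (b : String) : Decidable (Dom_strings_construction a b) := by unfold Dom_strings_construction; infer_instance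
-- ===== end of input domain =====

-- B replaces A's char-by-char consumption of b against a mutable copy of a by precomputed
-- per-character position indexes of b and round-by-round jumps via binary search (objective: faster).


-- ===== PORT A =====
-- one iteration of A's loop over b: membership test, remove first occurrence, reset on empty
def pvStepA (init : List Char) (s : Int × List Char) (v : Char) : Int × List Char :=
  if v ∈ s.2 then
    let copia' := (PySem.List.remove? s.2 v).getD []   -- guarded by the membership test, never none
    if copia' = [] then (s.1 + 1, init) else (s.1, copia')
  else s

def strings_construction (a : String) (b : String) : Int :=
  (b.toList.foldl (pvStepA a.toList) (0, a.toList)).1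

-- ===== PORT B =====
-- pos list of one char: [i for i, ch in enumerate(b) if ch == c], with i carried as accumulator
def pvOcc (c : Char) : Nat → List Char → List Nat
  | _, [] => []
  | i, x :: t => if x = c then i :: pvOcc c (i + 1) t else pvOcc c (i + 1) t

-- chars = []; for c in a: if c not in chars: chars.append(c)
def pvDedup (al : List Char) : List Char :=
  al.foldl (fun acc c => if c ∈ acc then acc else acc ++ [c]) []

-- the inner 'for ps, k in zip(pos, need)' loop: bisect_left(ps, s) ported as the count of
-- elements < s (exact for the sorted position lists); early 'return count' = none
def pvRoundB : List (List Nat × Nat) → Nat → Nat → Option Nat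
  | [], _, acc => some acc
  | (ps, k) :: t, s, acc =>
    match ps[ps.countP (fun m => decide (m < s)) + k - 1]? with
    | none => none
    | some m => pvRoundB t s (max acc m)

-- the 'while True' loop; fuel = len(b)+1 only makes the recursion total (each round moves s past
-- at least one character of b, so the fuel is never exhausted)
def pvLoopB (pn : List (List Nat × Nat)) : Nat → Nat → Int → Int
  | 0, _, cnt => cnt
  | fuel + 1, s, cnt =>
    match pvRoundB pn s 0 with
    | none => cnt
    | some p => pvLoopB pn fuel (p + 1) (cnt + 1)

def strings_construction_alt (a : String) (b : String) : Int :=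
  let al := a.toList
  if al = [] then 0
  else
    let bl := b.toList
    let chars := pvDedup al
    let pn := (chars.map fun c => pvOcc c 0 bl).zip (chars.map fun c => (al.count c : Nat))
    pvLoopB pn (bl.length + 1) 0 0

-- ===== PRECONDITION & SPEC =====
def Spec_strings_construction (a : String) (b : String) (out : Int) : Prop := out = strings_construction_alt a b
instance (a : String) (b : String) (out : Int) : Decidable (Spec_strings_construction a b out) := by unfold Spec_strings_construction; infer_instance

-- ===== CLAIM (what is proved, stated in full; the proofs are below) =====
def Claim_equal_strings_construction : Prop := ∀ (a : String) (b : String), Dom_strings_construction a b → Spec_strings_construction a b (strings_construction a b)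

-- ===== LEMMAS AND PROOFS =====

-- A's loop rephrased as structural recursion (proof-only helper)
def pvM (al : List Char) : List Char → List Char → Int → Int
  | [], _, cnt => cnt
  | v :: t, copia, cnt =>
    if v ∈ copia then
      let c' := copia.erase v
      if c' = [] then pvM al t al (cnt + 1) else pvM al t c' cnt
    else pvM al t copia cnt

-- position (1-based length of the prefix) at which A's current copy gets completed, if ever
def pvFd : List Char → List Char → Option Nat
  | [], _ => none
  | v :: t, copia =>
    if v ∈ copia then
      let c' := copia.erase v
      if c' = [] then some 1 else (pvFd t c').map (· + 1)
    else (pvFd t copia).map (· + 1)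

-- "the prefix l contains the multiset copia"
def pvDone (copia l : List Char) : Prop := ∀ c, copia.count c ≤ l.count c

theorem pvM_eq_fold (al : List Char) : ∀ (l copia : List Char) (cnt : Int),
    (l.foldl (pvStepA al) (cnt, copia)).1 = pvM al l copia cnt := by
  intro l
  induction l with
  | nil => intro copia cnt; rfl
  | cons v t ih =>
    intro copia cnt
    simp only [List.foldl_cons, pvM]
    by_cases hv : v ∈ copia
    · have hrw : (PySem.List.remove? copia v).getD [] = copia.erase v := by
        rw [PySem.List.remove?_eq_some_erase copia v hv]; rfl
      simp only [pvStepA, if_pos hv, hrw]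
      by_cases he : copia.erase v = []
      · simp only [if_pos he, ih]
      · simp only [if_neg he, ih]
    · simp only [pvStepA, if_neg hv, ih]

theorem pvM_fd (al : List Char) : ∀ (l copia : List Char) (cnt : Int),
    pvM al l copia cnt =
      match pvFd l copia with
      | none => cnt
      | some n => pvM al (l.drop n) al (cnt + 1) := by
  intro l
  induction l with
  | nil => intro copia cnt; rfl
  | cons v t ih =>
    intro copia cnt
    simp only [pvM, pvFd]
    by_cases hv : v ∈ copia
    · simp only [if_pos hv]
      by_cases he : copia.erase v = []
      · simp [he]
      · simp only [if_neg he, ih]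
        cases h : pvFd t (copia.erase v) <;> simp
    · simp only [if_neg hv, ih]
      cases h : pvFd t copia <;> simp

theorem pvCount_cons_ne (v c : Char) (t : List Char) (h : ¬ c = v) : (v :: t).count c = t.count c := by
  have hb : (v == c) = false := beq_eq_false_iff_ne.mpr (fun hh => h hh.symm)
  simp [List.count_cons, hb]

theorem pvDone_nil_iff (copia : List Char) : pvDone copia [] ↔ copia = [] := by
  constructor
  · intro h
    cases copia with
    | nil => rfl
    | cons x t =>
      have := h x
      simp [List.count_cons_self] at this
  · intro h; subst h; intro c; simp

-- shift lemma, consumed-char case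
theorem pvDone_cons_mem (copia t : List Char) (v : Char) (hv : v ∈ copia) :
    pvDone copia (v :: t) ↔ pvDone (copia.erase v) t := by
  constructor
  · intro h c
    by_cases hc : c = v
    · subst hc
      have := h c
      rw [List.count_erase_self]
      simp only [List.count_cons_self] at this
      omega
    · rw [List.count_erase_of_ne hc]
      have := h c
      rw [pvCount_cons_ne v c t hc] at this
      omega
  · intro h c
    by_cases hc : c = v
    · subst hc
      have := h c
      rw [List.count_erase_self] at this
      have hpos : 1 ≤ copia.count c := List.count_pos_iff.mpr hv
      simp only [List.count_cons_self]
      omega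
    · have := h c
      rw [List.count_erase_of_ne hc] at this
      rw [pvCount_cons_ne v c t hc]
      omega

-- shift lemma, skipped-char case
theorem pvDone_cons_not_mem (copia t : List Char) (v : Char) (hv : v ∉ copia) :
    pvDone copia (v :: t) ↔ pvDone copia t := by
  have hv0 : copia.count v = 0 := List.count_eq_zero.mpr hv
  constructor
  · intro h c
    by_cases hc : c = v
    · subst hc; simp [hv0]
    · have := h c; rw [pvCount_cons_ne v c t hc] at this; omega
  · intro h c
    by_cases hc : c = v
    · subst hc; simp [hv0]
    · have := h c; rw [pvCount_cons_ne v c t hc]; omega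

theorem pvFd_none (l : List Char) : ∀ copia, copia ≠ [] → pvFd l copia = none → ¬ pvDone copia l := by
  induction l with
  | nil => intro copia hne _ hd; exact hne ((pvDone_nil_iff copia).mp hd)
  | cons v t ih =>
    intro copia hne hfd hd
    simp only [pvFd] at hfd
    by_cases hv : v ∈ copia
    · rw [if_pos hv] at hfd
      by_cases he : copia.erase v = []
      · simp [he] at hfd
      · simp only [if_neg he, Option.map_eq_none_iff] at hfd
        exact ih (copia.erase v) he hfd ((pvDone_cons_mem copia t v hv).mp hd)
    · rw [if_neg hv] at hfd
      simp only [Option.map_eq_none_iff] at hfd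
      exact ih copia hne hfd ((pvDone_cons_not_mem copia t v hv).mp hd)

theorem pvFd_some (l : List Char) : ∀ copia n, copia ≠ [] → pvFd l copia = some n →
    pvDone copia (l.take n) ∧ ∀ m < n, ¬ pvDone copia (l.take m) := by
  induction l with
  | nil => intro copia n _ h; simp [pvFd] at h
  | cons v t ih =>
    intro copia n hne hfd
    simp only [pvFd] at hfd
    by_cases hv : v ∈ copia
    · rw [if_pos hv] at hfd
      by_cases he : copia.erase v = []
      · simp only [if_pos he, Option.some.injEq] at hfd
        subst hfd
        have hcop : copia = [v] := by
          have hlen := List.length_erase_of_mem hv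
          rw [he] at hlen
          simp at hlen
          cases copia with
          | nil => simp at hv
          | cons x u =>
            simp at hlen
            have := List.length_eq_zero_iff.mp hlen.symm
            subst this
            simp at hv
            simp [hv]
        constructor
        · rw [hcop]
          intro c
          by_cases hc : c = v
          · subst hc; simp
          · simp [pvCount_cons_ne v c [] hc]
        · intro m hm hd
          interval_cases m
          exact hne ((pvDone_nil_iff copia).mp hd)
      · simp only [if_neg he] at hfd
        rw [Option.map_eq_some_iff] at hfd
        obtain ⟨n', hn', rfl⟩ := hfd
        obtain ⟨h1, h2⟩ := ih (copia.erase v) n' he hn'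
        constructor
        · simpa [List.take_succ_cons, pvDone_cons_mem copia _ v hv] using h1
        · intro m hm hd
          cases m with
          | zero => exact hne ((pvDone_nil_iff copia).mp hd)
          | succ m' =>
            rw [List.take_succ_cons, pvDone_cons_mem copia _ v hv] at hd
            exact h2 m' (by omega) hd
    · rw [if_neg hv] at hfd
      rw [Option.map_eq_some_iff] at hfd
      obtain ⟨n', hn', rfl⟩ := hfd
      obtain ⟨h1, h2⟩ := ih copia n' hne hn'
      constructor
      · simpa [List.take_succ_cons, pvDone_cons_not_mem copia _ v hv] using h1
      · intro m hm hd
        cases m with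
        | zero => exact hne ((pvDone_nil_iff copia).mp hd)
        | succ m' =>
          rw [List.take_succ_cons, pvDone_cons_not_mem copia _ v hv] at hd
          exact h2 m' (by omega) hd

-- counts in a prefix are bounded by counts in the whole list
theorem pvCount_take_le (l : List Char) (n : Nat) (c : Char) : (l.take n).count c ≤ l.count c := by
  conv_rhs => rw [← List.take_append_drop n l]
  rw [List.count_append]
  omega

theorem pvDone_take (copia l : List Char) (n : Nat) (h : pvDone copia (l.take n)) : pvDone copia l :=
  fun c => le_trans (h c) (pvCount_take_le l n c)

-- pvDedup membership
theorem pvDedup_mem_aux (al : List Char) : ∀ acc x,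
    (x ∈ al.foldl (fun acc c => if c ∈ acc then acc else acc ++ [c]) acc ↔ x ∈ acc ∨ x ∈ al) := by
  induction al with
  | nil => intro acc x; simp
  | cons v t ih =>
    intro acc x
    simp only [List.foldl_cons]
    by_cases hv : v ∈ acc
    · rw [if_pos hv, ih]
      constructor
      · rintro (h | h)
        · exact Or.inl h
        · exact Or.inr (List.mem_cons_of_mem v h)
      · rintro (h | h)
        · exact Or.inl h
        · rcases List.mem_cons.mp h with rfl | h
          · exact Or.inl hv
          · exact Or.inr h
    · rw [if_neg hv, ih]
      simp [List.mem_append, List.mem_cons]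
      tauto
  
theorem pvDedup_mem (al : List Char) (x : Char) : x ∈ pvDedup al ↔ x ∈ al := by
  rw [pvDedup, pvDedup_mem_aux al [] x]; simp

-- ===== pvOcc lemmas =====

theorem pvOcc_bounds (c : Char) : ∀ (l : List Char) (i m : Nat), m ∈ pvOcc c i l → i ≤ m ∧ m < i + l.length := by
  intro l
  induction l with
  | nil => intro i m h; simp [pvOcc] at h
  | cons x t ih =>
    intro i m h
    simp only [pvOcc] at h
    by_cases hx : x = c
    · rw [if_pos hx] at h
      rcases List.mem_cons.mp h with rfl | h
      · simp
      · have := ih (i + 1) m h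
        simp only [List.length_cons]
        omega
    · rw [if_neg hx] at h
      have := ih (i + 1) m h
      simp only [List.length_cons]
      omega

theorem pvOcc_length (c : Char) : ∀ (l : List Char) (i : Nat), (pvOcc c i l).length = l.count c := by
  intro l
  induction l with
  | nil => intro i; rfl
  | cons x t ih =>
    intro i
    simp only [pvOcc]
    by_cases hx : x = c
    · subst hx
      simp [List.count_cons_self, ih]
    · rw [if_neg hx, ih, pvCount_cons_ne x c t (fun h => hx h.symm)]

theorem pvOcc_append (c : Char) : ∀ (u v : List Char) (i : Nat),
    pvOcc c i (u ++ v) = pvOcc c i u ++ pvOcc c (i + u.length) v := by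
  intro u
  induction u with
  | nil => intro v i; simp [pvOcc]
  | cons x t ih =>
    intro v i
    simp only [List.cons_append, pvOcc]
    by_cases hx : x = c
    · rw [if_pos hx, if_pos hx, ih]
      simp [Nat.add_assoc, Nat.add_comm 1 t.length]
    · rw [if_neg hx, if_neg hx, ih]
      simp [Nat.add_assoc, Nat.add_comm 1 t.length]

theorem pvOcc_shift (c : Char) : ∀ (l : List Char) (i : Nat), pvOcc c i l = (pvOcc c 0 l).map (· + i) := by
  intro l
  induction l with
  | nil => intro i; rfl
  | cons x t ih =>
    intro i
    simp only [pvOcc]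
    by_cases hx : x = c
    · rw [if_pos hx, if_pos hx, ih (i + 1), ih 1]
      simp only [List.map_cons, List.map_map]
      refine List.cons_eq_cons.mpr ⟨by omega, ?_⟩
      apply List.map_congr_left
      intro m _
      simp only [Function.comp_apply]
      omega
    · rw [if_neg hx, if_neg hx, ih (i + 1), ih 1]
      simp only [List.map_map]
      apply List.map_congr_left
      intro m _
      simp only [Function.comp_apply]
      omega

-- the j-th position is where the count first reaches j+1
theorem pvOcc_get_spec (c : Char) : ∀ (l : List Char) (j m : Nat),
    (pvOcc c 0 l)[j]? = some m → ∀ n, (j + 1 ≤ (l.take n).count c ↔ m + 1 ≤ n) := by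
  intro l
  induction l with
  | nil => intro j m h; simp [pvOcc] at h
  | cons x t ih =>
    intro j m h n
    simp only [pvOcc] at h
    by_cases hx : x = c
    · subst hx
      rw [if_pos rfl, pvOcc_shift x t 1] at h
      cases j with
      | zero =>
        simp at h
        subst h
        cases n with
        | zero => simp
        | succ n' => simp [List.take_succ_cons, List.count_cons_self]
      | succ j' =>
        rw [List.getElem?_cons_succ, List.getElem?_map] at h
        rw [Option.map_eq_some_iff] at h
        obtain ⟨m', hm', rfl⟩ := h
        cases n with
        | zero => simp
        | succ n' =>
          rw [List.take_succ_cons, List.count_cons_self]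
          have := ih j' m' hm' n'
          omega
    · rw [if_neg hx, pvOcc_shift c t 1] at h
      rw [List.getElem?_map, Option.map_eq_some_iff] at h
      obtain ⟨m', hm', rfl⟩ := h
      cases n with
      | zero => simp
      | succ n' =>
        rw [List.take_succ_cons, pvCount_cons_ne x c _ (fun h => hx h.symm)]
        have := ih j m' hm' n'
        omega

-- the position looked up by one inner-loop step, split at the boundary u/d
theorem pvOcc_idx' (c : Char) (u d : List Char) (k : Nat) (hk : 1 ≤ k) :
    (pvOcc c 0 (u ++ d))[(pvOcc c 0 (u ++ d)).countP (fun m => decide (m < u.length)) + k - 1]? =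
      ((pvOcc c 0 d)[k - 1]?).map (· + u.length) := by
  rw [pvOcc_append, List.countP_append]
  have h1 : (pvOcc c 0 u).countP (fun m => decide (m < u.length)) = (pvOcc c 0 u).length := by
    apply List.countP_eq_length.mpr
    intro m hm
    have := pvOcc_bounds c u 0 m hm
    simp only [decide_eq_true_eq]
    omega
  have h2 : (pvOcc c (0 + u.length) d).countP (fun m => decide (m < u.length)) = 0 := by
    apply List.countP_eq_zero.mpr
    intro m hm
    have := pvOcc_bounds c d (0 + u.length) m hm
    simp only [decide_eq_true_eq]
    omega
  rw [h1, h2, List.getElem?_append_right (by omega)]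
  rw [pvOcc_shift c d (0 + u.length), List.getElem?_map]
  have : (pvOcc c 0 u).length + 0 + k - 1 - (pvOcc c 0 u).length = k - 1 := by omega
  rw [this]
  simp

-- the same, phrased on bl with the bisect count
theorem pvOcc_idx (c : Char) (bl : List Char) (s k : Nat) (hs : s ≤ bl.length) (hk : 1 ≤ k) :
    (pvOcc c 0 bl)[(pvOcc c 0 bl).countP (fun m => decide (m < s)) + k - 1]? =
      ((pvOcc c 0 (bl.drop s))[k - 1]?).map (· + s) := by
  have hu : (bl.take s).length = s := by simp [hs]
  have h := pvOcc_idx' c (bl.take s) (bl.drop s) k hk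
  rw [List.take_append_drop, hu] at h
  exact h

-- ===== round lemmas =====

theorem pvRoundB_none_iff (bl : List Char) (al : List Char) (s : Nat) (hs : s ≤ bl.length) :
    ∀ (cs : List Char) (acc : Nat), (∀ c ∈ cs, c ∈ al) →
    (pvRoundB (cs.map fun c => (pvOcc c 0 bl, (al.count c : Nat))) s acc = none ↔
      ∃ c ∈ cs, (bl.drop s).count c < al.count c) := by
  intro cs
  induction cs with
  | nil => intro acc _; simp [pvRoundB]
  | cons c t ih =>
    intro acc hmem
    have hk : 1 ≤ al.count c := List.count_pos_iff.mpr (hmem c (List.mem_cons_self))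
    simp only [List.map_cons, pvRoundB]
    rw [pvOcc_idx c bl s (al.count c) hs hk]
    cases hlook : (pvOcc c 0 (bl.drop s))[al.count c - 1]? with
    | none =>
      simp only [Option.map_none]
      have : (bl.drop s).count c < al.count c := by
        have := List.getElem?_eq_none_iff.mp hlook
        rw [pvOcc_length] at this
        omega
      simp only [true_iff]
      exact ⟨c, List.mem_cons_self, this⟩
    | some m =>
      simp only [Option.map_some]
      rw [ih (max acc (m + s)) (fun c' hc' => hmem c' (List.mem_cons_of_mem c hc'))]
      constructor
      · rintro ⟨c', hc', h⟩
        exact ⟨c', List.mem_cons_of_mem c hc', h⟩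
      · rintro ⟨c', hc', h⟩
        rcases List.mem_cons.mp hc' with rfl | hc'
        · exfalso
          have hlen : al.count c' - 1 < (pvOcc c' 0 (bl.drop s)).length := by
            exact (List.getElem?_eq_some_iff.mp hlook).1
          rw [pvOcc_length] at hlen
          omega
        · exact ⟨c', hc', h⟩

theorem pvRoundB_some (bl : List Char) (al : List Char) (s : Nat) (hs : s ≤ bl.length) :
    ∀ (cs : List Char) (acc p : Nat), (∀ c ∈ cs, c ∈ al) →
    pvRoundB (cs.map fun c => (pvOcc c 0 bl, (al.count c : Nat))) s acc = some p →
    acc ≤ p ∧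
    (∀ c ∈ cs, al.count c ≤ ((bl.drop s).take (p + 1 - s)).count c) ∧
    (p = acc ∨ ∃ c ∈ cs, ∃ m, (pvOcc c 0 (bl.drop s))[al.count c - 1]? = some m ∧ p = m + s ∧
        ∀ n < p + 1 - s, ((bl.drop s).take n).count c < al.count c) := by
  intro cs
  induction cs with
  | nil =>
    intro acc p _ h
    simp only [List.map_nil, pvRoundB, Option.some.injEq] at h
    subst h
    exact ⟨le_refl _, by simp, Or.inl rfl⟩
  | cons c t ih =>
    intro acc p hmem h
    have hk : 1 ≤ al.count c := List.count_pos_iff.mpr (hmem c (List.mem_cons_self))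
    simp only [List.map_cons, pvRoundB] at h
    rw [pvOcc_idx c bl s (al.count c) hs hk] at h
    cases hlook : (pvOcc c 0 (bl.drop s))[al.count c - 1]? with
    | none => rw [hlook] at h; simp at h
    | some m =>
      rw [hlook] at h
      simp only [Option.map_some] at h
      obtain ⟨hacc, hcov, hwit⟩ := ih (max acc (m + s)) p (fun c' hc' => hmem c' (List.mem_cons_of_mem c hc')) h
      have hspec := pvOcc_get_spec c (bl.drop s) (al.count c - 1) m hlook
      have hms : m + s ≤ p := le_trans (le_max_right acc (m + s)) hacc
      refine ⟨le_trans (le_max_left _ _) hacc, ?_, ?_⟩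
      · intro c' hc'
        rcases List.mem_cons.mp hc' with rfl | hc'
        · have := (hspec (p + 1 - s)).mpr (by omega)
          omega
        · exact hcov c' hc'
      · rcases hwit with hpa | ⟨c', hc', m', hm', hpm, hmin⟩
        · rcases max_choice acc (m + s) with hmx | hmx
          · rw [hmx] at hpa; exact Or.inl hpa
          · rw [hmx] at hpa
            refine Or.inr ⟨c, List.mem_cons_self, m, hlook, hpa, ?_⟩
            intro n hn
            by_contra hge
            have := (hspec n).mp (by omega)
            omega
        · exact Or.inr ⟨c', List.mem_cons_of_mem c hc', m', hm', hpm, hmin⟩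

-- ===== the main loop correspondence =====

theorem pvMainLoop (a : String) (b : String) (hne : a.toList ≠ []) :
    ∀ (fuel s : Nat) (cnt : Int), s ≤ b.toList.length → b.toList.length + 1 - s ≤ fuel →
    pvM a.toList (b.toList.drop s) a.toList cnt =
      pvLoopB ((pvDedup a.toList).map fun c =>
        (pvOcc c 0 b.toList, (a.toList.count c : Nat))) fuel s cnt := by
  intro fuel
  induction fuel with
  | zero => intro s cnt hs hf; omega
  | succ fuel ih =>
    intro s cnt hs hf
    set al := a.toList with hal
    set bl := b.toList with hbl
    have hmem : ∀ c ∈ pvDedup al, c ∈ al := fun c hc => (pvDedup_mem al c).mp hc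
    simp only [pvLoopB]
    cases hround : pvRoundB ((pvDedup al).map fun c => (pvOcc c 0 bl, (al.count c : Nat))) s 0 with
    | none =>
      obtain ⟨c, hc, hlt⟩ := (pvRoundB_none_iff bl al s hs (pvDedup al) 0 hmem).mp hround
      have hnd : ¬ pvDone al (bl.drop s) := by
        intro hd
        have := hd c
        omega
      cases hfd : pvFd (bl.drop s) al with
      | none => rw [pvM_fd, hfd]
      | some n =>
        exfalso
        obtain ⟨h1, _⟩ := pvFd_some (bl.drop s) al n hne hfd
        exact hnd (pvDone_take al (bl.drop s) n h1)
    | some p =>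
      obtain ⟨_, hcov, hwit⟩ := pvRoundB_some bl al s hs (pvDedup al) 0 p hmem hround
      -- the prefix of length p+1-s of bl.drop s completes one copy of al, minimally
      have hD : pvDone al ((bl.drop s).take (p + 1 - s)) := by
        intro c
        by_cases hc : c ∈ al
        · exact hcov c ((pvDedup_mem al c).mpr hc)
        · rw [List.count_eq_zero.mpr hc]; omega
      have hmin : ∀ m < p + 1 - s, ¬ pvDone al ((bl.drop s).take m) := by
        rcases hwit with hp0 | ⟨c, hc, m', hm', hpm, hminc⟩
        · subst hp0
          intro m hm hd
          have hm0 : m = 0 := by omega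
          subst hm0
          simp only [List.take_zero] at hd
          exact hne ((pvDone_nil_iff al).mp hd)
        · intro m hm hd
          have := hd c
          have := hminc m hm
          omega
      have hn1 : 1 ≤ p + 1 - s := by
        by_contra h0
        have : p + 1 - s = 0 := by omega
        rw [this] at hD
        simp only [List.take_zero] at hD
        exact hne ((pvDone_nil_iff al).mp hD)
      have hsp : s ≤ p := by omega
      -- p is an actual position of bl, so p < bl.length
      have hplt : p < bl.length := by
        rcases hwit with hp0 | ⟨c, hc, m', hm', hpm, _⟩
        · -- p = 0; the head character of pvDedup al succeeded, so bl.drop s is nonempty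
          subst hp0
          cases hcs : pvDedup al with
          | nil =>
            exfalso
            cases hal' : al with
            | nil => exact hne hal'
            | cons x u =>
              have : x ∈ pvDedup al := (pvDedup_mem al x).mpr (by rw [hal']; exact List.mem_cons_self)
              rw [hcs] at this
              simp at this
          | cons c0 cs' =>
            rw [hcs] at hround
            simp only [List.map_cons, pvRoundB] at hround
            rw [pvOcc_idx c0 bl s (al.count c0) hs (List.count_pos_iff.mpr (hmem c0 (by rw [hcs]; exact List.mem_cons_self))) ] at hround
            cases hlook : (pvOcc c0 0 (bl.drop s))[al.count c0 - 1]? with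
            | none => rw [hlook] at hround; simp at hround
            | some m0 =>
              have hmem0 : m0 ∈ pvOcc c0 0 (bl.drop s) := List.mem_of_getElem? hlook
              have := pvOcc_bounds c0 (bl.drop s) 0 m0 hmem0
              have hdl : (bl.drop s).length = bl.length - s := List.length_drop
              omega
        · have hmem' : m' ∈ pvOcc c 0 (bl.drop s) := List.mem_of_getElem? hm'
          have := pvOcc_bounds c (bl.drop s) 0 m' hmem'
          have hdl : (bl.drop s).length = bl.length - s := List.length_drop
          omega
      -- A's side finds the same round end
      cases hfd : pvFd (bl.drop s) al with
      | none =>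
        exfalso
        exact pvFd_none (bl.drop s) al hne hfd (pvDone_take al (bl.drop s) (p + 1 - s) hD)
      | some n =>
        obtain ⟨h1, h2⟩ := pvFd_some (bl.drop s) al n hne hfd
        have hnn : n = p + 1 - s := by
          by_contra hne'
          rcases Nat.lt_or_ge n (p + 1 - s) with hlt | hge
          · exact hmin n hlt h1
          · have : p + 1 - s < n := by omega
            exact h2 (p + 1 - s) this hD
        rw [pvM_fd, hfd]
        show pvM al ((bl.drop s).drop n) al (cnt + 1) = pvLoopB _ fuel (p + 1) (cnt + 1)
        rw [List.drop_drop, hnn]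
        have harith : s + (p + 1 - s) = p + 1 := by omega
        rw [harith]
        exact ih (p + 1) (cnt + 1) (by omega) (by omega)

-- A's fold with an empty copy never changes state
theorem pvFold_nil (al : List Char) : ∀ (l : List Char) (cnt : Int),
    (l.foldl (pvStepA al) (cnt, ([] : List Char))).1 = cnt := by
  intro l
  induction l with
  | nil => intro cnt; rfl
  | cons v t ih =>
    intro cnt
    simp only [List.foldl_cons, pvStepA]
    simp [ih]

-- ===== VERDICT (by name: the statement is the Claim_ definition above) =====
theorem strings_construction_spec : Claim_equal_strings_construction := by
  intro a b _
  unfold Spec_strings_construction strings_construction strings_construction_alt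
  by_cases hne : a.toList = []
  · rw [if_pos hne, hne]
    exact pvFold_nil [] b.toList 0
  · rw [if_neg hne]
    rw [pvM_eq_fold a.toList b.toList a.toList 0]
    have := pvMainLoop a b hne (b.toList.length + 1) 0 0 (by omega) (by omega)
    simp only [List.drop_zero] at this
    simp only [List.zip_map']
    exact this
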